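-- pv_equiv track=rewrite | github.com/linzeyang/leetcode-solutions | easy/3852.py | minDistinctFreqPair
-- ===== SOURCE A (Python) =====
-- from collections import Counter
--
-- def minDistinctFreqPair(nums: list[int]) -> list[int]:
--     counter: Counter[int] = Counter(nums)
--
--     if len(counter) < 2:
--         return [-1, -1]
--
--     sorted_keys: list[int] = sorted(counter.keys())
--
--     x: int = sorted_keys[0]
--
--     for idx in range(1, len(sorted_keys)):
--         if counter[sorted_keys[idx]] != counter[x]:
--             return [x, sorted_keys[idx]]
--
--     return [-1, -1]
-- ===== SOURCE B (Python) =====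
-- from collections import Counter
--
-- def minDistinctFreqPair(nums: list[int]) -> list[int]:
--     counts = Counter(nums)
--     if not counts:
--         return [-1, -1]
--     x = min(counts)
--     fx = counts[x]
--     y = min((k for k in counts if counts[k] != fx), default=None)
--     return [-1, -1] if y is None else [x, y]
-- ===== Notes on version B (the rewrite author's own statement) =====
-- stated objective: simpler
-- what changed: B drops the sort-then-scan: instead of sorting the distinct keys and scanning for the first key with a differing count, it takes min of the keys and the min of the keys whose count differs from the min key's count.
import Mathlib
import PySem

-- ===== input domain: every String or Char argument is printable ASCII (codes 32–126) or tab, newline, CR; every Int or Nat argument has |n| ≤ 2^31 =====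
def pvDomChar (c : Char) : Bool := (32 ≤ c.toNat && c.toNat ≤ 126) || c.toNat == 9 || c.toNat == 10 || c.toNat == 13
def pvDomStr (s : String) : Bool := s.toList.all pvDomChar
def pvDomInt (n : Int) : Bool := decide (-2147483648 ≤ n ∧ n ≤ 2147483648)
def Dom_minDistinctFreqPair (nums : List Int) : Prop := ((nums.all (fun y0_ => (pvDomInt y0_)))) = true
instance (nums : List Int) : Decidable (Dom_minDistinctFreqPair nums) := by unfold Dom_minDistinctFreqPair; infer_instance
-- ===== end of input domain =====

-- B removes the sort: instead of sorting the distinct keys and scanning for the first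
-- differing frequency, it takes min of the keys and min of the keys whose count differs.

-- ===== PORT A =====
-- A-side helper: the 'for idx in range(1, len(sorted_keys)): if … return' loop,
-- as structural recursion over sorted_keys[1:] (returns the first key with a differing count).
def pvALoop (c : Int → Int) (fx : Int) : List Int → Option Int
  | [] => none
  | k :: t => if c k ≠ fx then some k else pvALoop c fx t

def minDistinctFreqPair (nums : List Int) : List Int :=
  let counter := PySem.Dict.counter nums
  if counter.size < 2 then [-1, -1]
  else
    let sortedKeys := PySem.List.sorted counter.keys (fun k => k) false
    -- sorted_keys[0]: the list is nonempty here (size ≥ 2), so the default is never used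
    let x := PySem.List.pyGetD sortedKeys 0 0
    match pvALoop (fun k => counter.getD k 0) (counter.getD x 0) (sortedKeys.drop 1) with
    | some y => [x, y]
    | none => [-1, -1]

-- ===== PORT B =====
def minDistinctFreqPair_alt (nums : List Int) : List Int :=
  let counts := PySem.Dict.counter nums
  if counts.size = 0 then [-1, -1]
  else
    -- min(counts): the dict is nonempty here, so min? is some and the default is never used
    let x := (PySem.List.min? counts.keys (fun k => k)).getD 0
    let fx := counts.getD x 0
    match PySem.List.min? (counts.keys.filter (fun k => decide (counts.getD k 0 ≠ fx))) (fun k => k) with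
    | none => [-1, -1]
    | some y => [x, y]

-- ===== PRECONDITION & SPEC =====
def Spec_minDistinctFreqPair (nums : List Int) (out : List Int) : Prop := out = minDistinctFreqPair_alt nums
instance (nums : List Int) (out : List Int) : Decidable (Spec_minDistinctFreqPair nums out) := by unfold Spec_minDistinctFreqPair; infer_instance

-- ===== CLAIM (what is proved, stated in full; the proofs are below) =====
def Claim_equal_minDistinctFreqPair : Prop := ∀ (nums : List Int), Dom_minDistinctFreqPair nums → Spec_minDistinctFreqPair nums (minDistinctFreqPair nums)

-- ===== LEMMAS AND PROOFS =====

-- min? of any list equals the head of a strictly increasing rearrangement of it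
lemma min?_eq_head? (sk K : List Int) (hperm : sk.Perm K) (hlt : sk.Pairwise (· < ·)) :
    PySem.List.min? K (fun k => k) = sk.head? := by
  cases sk with
  | nil =>
    have hKnil : K = [] := hperm.nil_eq.symm
    subst hKnil
    rfl
  | cons m t =>
    have hK : K ≠ [] := by
      intro h; subst h; exact (List.cons_ne_nil m t) hperm.eq_nil
    obtain ⟨k0, K', hKc⟩ : ∃ k0 K', K = k0 :: K' := by
      cases K with
      | nil => exact absurd rfl hK
      | cons a b => exact ⟨a, b, rfl⟩
    obtain ⟨m', hm'⟩ : ∃ m', PySem.List.min? K (fun k => k) = some m' := by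
      rw [hKc, PySem.List.min?_id_cons]; exact ⟨_, rfl⟩
    have hmem : m' ∈ K := PySem.List.min?_mem hm'
    have hmin := PySem.List.min?_isMin hm'
    have hm_mem : m ∈ K := hperm.mem_iff.mp (List.mem_cons_self)
    have h1 : m' ≤ m := hmin m hm_mem
    have h2 : m ≤ m' := by
      have : m' ∈ (m :: t) := hperm.mem_iff.mpr hmem
      rcases List.mem_cons.mp this with h | h
      · exact le_of_eq h.symm
      · exact le_of_lt ((List.pairwise_cons.mp hlt).1 m' h)
    rw [hm', List.head?_cons, le_antisymm h1 h2]

-- A's scan returns the head of the filtered list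
lemma pvALoop_eq_head?_filter (c : Int → Int) (fx : Int) (l : List Int) :
    pvALoop c fx l = (l.filter (fun k => decide (c k ≠ fx))).head? := by
  induction l with
  | nil => rfl
  | cons k t ih =>
    by_cases h : c k ≠ fx
    · simp [pvALoop, h]
    · simp [pvALoop, h, ih]

-- ===== VERDICT (by name: the statement is the Claim_ definition above) =====
theorem minDistinctFreqPair_spec : Claim_equal_minDistinctFreqPair := by
  intro nums _
  show minDistinctFreqPair nums = minDistinctFreqPair_alt nums
  unfold minDistinctFreqPair minDistinctFreqPair_alt
  set d := PySem.Dict.counter nums with hd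
  have hkeys : d.keys = PySem.Set.ofList nums := PySem.Dict.keys_counter nums
  set K := PySem.Set.ofList nums with hK
  set sk := PySem.List.sorted K (fun k => k) false with hsk
  have hperm : sk.Perm K := PySem.List.sorted_perm K (fun k => k) false
  have hlt : sk.Pairwise (· < ·) := PySem.List.sorted_ofList_pairwise_lt nums
  have hsize : d.size = K.length := by
    show (PySem.Dict.counter nums).items.length = K.length
    rw [PySem.Dict.items_counter]
    simp [hK]
  have hminK : PySem.List.min? K (fun k => k) = sk.head? := min?_eq_head? sk K hperm hlt
  rcases hsk' : sk with _ | ⟨x, t⟩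
  · -- K empty: both sides return [-1,-1]
    have hKnil : K = [] := (hsk' ▸ hperm).nil_eq.symm
    have : K.length = 0 := by simp [hKnil]
    simp [hsize, this]
  · have hx0 : PySem.List.pyGetD sk 0 0 = x := by
      rw [hsk']; exact PySem.List.pyGetD_zero_cons x t 0
    have hminx : (PySem.List.min? K (fun k => k)).getD 0 = x := by
      rw [hminK, hsk']; rfl
    -- the filtered keys, with the count predicate
    have hfperm : (sk.filter (fun k => decide (d.getD k 0 ≠ d.getD x 0))).Perm
        (K.filter (fun k => decide (d.getD k 0 ≠ d.getD x 0))) := hperm.filter _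
    have hflt : (sk.filter (fun k => decide (d.getD k 0 ≠ d.getD x 0))).Pairwise (· < ·) :=
      hlt.filter _
    have hminF : PySem.List.min? (K.filter (fun k => decide (d.getD k 0 ≠ d.getD x 0)))
        (fun k => k) = (sk.filter (fun k => decide (d.getD k 0 ≠ d.getD x 0))).head? :=
      min?_eq_head? _ _ hfperm hflt
    have hfx : sk.filter (fun k => decide (d.getD k 0 ≠ d.getD x 0))
        = t.filter (fun k => decide (d.getD k 0 ≠ d.getD x 0)) := by
      rw [hsk']; simp
    have hloop : pvALoop (fun k => d.getD k 0) (d.getD x 0) (sk.drop 1)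
        = (t.filter (fun k => decide (d.getD k 0 ≠ d.getD x 0))).head? := by
      rw [hsk']; simpa using pvALoop_eq_head?_filter (fun k => d.getD k 0) (d.getD x 0) t
    have hlenK : K.length = sk.length := hperm.length_eq.symm
    by_cases hsz : K.length < 2
    · -- 0 or 1 distinct keys: A short-circuits; B's filter is empty
      have hlen1 : sk.length = 1 := by
        have : sk.length ≠ 0 := by rw [hsk']; simp
        omega
      have ht : t = [] := by
        rw [hsk'] at hlen1; simpa using hlen1
      have hfilt : t.filter (fun k => decide (d.getD k 0 ≠ d.getD x 0)) = [] := by simp [ht]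
      simp only [hkeys, hsize]
      rw [if_pos hsz]
      have hKlen0 : ¬ K.length = 0 := by omega
      rw [if_neg hKlen0]
      rw [hminx, hminF, hfx, hfilt]
      rfl
    · simp only [hkeys, hsize]
      rw [if_neg hsz]
      have hKlen0 : ¬ K.length = 0 := by omega
      rw [if_neg hKlen0]
      rw [← hsk, hx0, hloop, hminx, hminF, hfx]
      cases (t.filter (fun k => decide (d.getD k 0 ≠ d.getD x 0))).head? <;> rfl
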